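-- pv_equiv track=rewrite | github.com/ictxiangxin/mephisto | mp_date_time.py | year_to_number
-- ===== SOURCE A (Python) =====
-- def is_leap_year(y):
--     leap_year = False
--     if y % 100 == 0:
--         if y % 400 == 0:
--             leap_year = True
--     elif y % 4 == 0:
--         leap_year = True
--     return leap_year
--
-- def year_to_number(y):
--     number = 0
--     for i in range(1, y):
--         if is_leap_year(i):
--             number += 366
--         else:
--             number += 365
--     return number
-- ===== SOURCE B (Python) =====
-- def year_to_number(y):
--     n = y - 1 if y > 1 else 0
--     return 365 * n + n // 4 - n // 100 + n // 400
-- ===== Notes on version B (the rewrite author's own statement) =====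
-- stated objective: faster
-- what changed: Replaced the per-year loop that adds 365/366 with the closed form 365*n + n//4 - n//100 + n//400 for n = max(y-1, 0) leap-year days.
import Mathlib
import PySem

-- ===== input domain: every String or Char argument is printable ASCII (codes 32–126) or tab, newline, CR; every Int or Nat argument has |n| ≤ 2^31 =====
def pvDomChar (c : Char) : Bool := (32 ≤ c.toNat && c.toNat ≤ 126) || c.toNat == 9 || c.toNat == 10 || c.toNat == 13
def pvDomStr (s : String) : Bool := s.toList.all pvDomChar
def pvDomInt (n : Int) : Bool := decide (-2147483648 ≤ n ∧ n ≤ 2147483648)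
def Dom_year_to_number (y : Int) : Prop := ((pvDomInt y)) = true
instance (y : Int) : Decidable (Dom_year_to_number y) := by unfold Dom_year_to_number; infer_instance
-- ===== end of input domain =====

-- B replaces A's per-year loop by the closed form 365*n + n//4 - n//100 + n//400 for n = max(y-1, 0) (objective: faster).

-- ===== PORT A =====
def is_leap_year (y : Int) : Bool :=
  if PySem.Int.mod y 100 == 0 then
    (if PySem.Int.mod y 400 == 0 then true else false)
  else if PySem.Int.mod y 4 == 0 then true
  else false

def year_to_number (y : Int) : Int :=
  (PySem.List.pyRange 1 y 1).foldl
    (fun number i => if is_leap_year i then number + 366 else number + 365) 0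

-- ===== PORT B =====
def year_to_number_alt (y : Int) : Int :=
  let n : Int := if y > 1 then y - 1 else 0
  365 * n + PySem.Int.floordiv n 4 - PySem.Int.floordiv n 100 + PySem.Int.floordiv n 400

-- ===== PRECONDITION & SPEC =====
def Spec_year_to_number (y : Int) (out : Int) : Prop := out = year_to_number_alt y
instance (y : Int) (out : Int) : Decidable (Spec_year_to_number y out) := by unfold Spec_year_to_number; infer_instance

-- ===== CLAIM (what is proved, stated in full; the proofs are below) =====
def Claim_equal_year_to_number : Prop := ∀ (y : Int), Dom_year_to_number y → Spec_year_to_number y (year_to_number y)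

-- ===== LEMMAS AND PROOFS =====

-- The closed form grows by 366 across year m+1 exactly when m+1 is a leap year.
theorem pv_closed_step (m : Int) :
    365 * (m + 1) + PySem.Int.floordiv (m + 1) 4 - PySem.Int.floordiv (m + 1) 100
      + PySem.Int.floordiv (m + 1) 400
    = (365 * m + PySem.Int.floordiv m 4 - PySem.Int.floordiv m 100 + PySem.Int.floordiv m 400)
      + (if is_leap_year (m + 1) then 366 else 365) := by
  unfold is_leap_year
  rw [PySem.Int.floordiv_eq_ediv_of_pos (a := m + 1) (b := 4) (by norm_num),
    PySem.Int.floordiv_eq_ediv_of_pos (a := m + 1) (b := 100) (by norm_num),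
    PySem.Int.floordiv_eq_ediv_of_pos (a := m + 1) (b := 400) (by norm_num),
    PySem.Int.floordiv_eq_ediv_of_pos (a := m) (b := 4) (by norm_num),
    PySem.Int.floordiv_eq_ediv_of_pos (a := m) (b := 100) (by norm_num),
    PySem.Int.floordiv_eq_ediv_of_pos (a := m) (b := 400) (by norm_num),
    PySem.Int.mod_eq_emod_of_pos (a := m + 1) (b := 4) (by norm_num),
    PySem.Int.mod_eq_emod_of_pos (a := m + 1) (b := 100) (by norm_num),
    PySem.Int.mod_eq_emod_of_pos (a := m + 1) (b := 400) (by norm_num)]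
  simp only [beq_iff_eq]
  split_ifs <;> simp_all <;> omega

-- On y = 1 + n (n : Nat) the branch of B simplifies to the closed form in n.
theorem pv_alt_closed (n : Nat) :
    year_to_number_alt (1 + (n : Int))
    = 365 * (n : Int) + PySem.Int.floordiv (n : Int) 4 - PySem.Int.floordiv (n : Int) 100
      + PySem.Int.floordiv (n : Int) 400 := by
  unfold year_to_number_alt
  rcases Nat.eq_zero_or_pos n with h | h
  · subst h; decide
  · have hgt : (1 : Int) + (n : Int) > 1 := by
      have : (0 : Int) < (n : Int) := by exact_mod_cast h
      omega
    simp [hgt]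

-- A's loop unrolled one step at the top end.
theorem pv_loop_step (n : Nat) :
    year_to_number ((1 + (n : Int)) + 1)
    = if is_leap_year (1 + (n : Int)) then year_to_number (1 + (n : Int)) + 366
      else year_to_number (1 + (n : Int)) + 365 := by
  unfold year_to_number
  rw [PySem.List.pyRange_one_succ_right (a := 1) (b := 1 + (n : Int)) (by omega),
    List.foldl_append]
  simp

theorem pv_main (n : Nat) :
    year_to_number (1 + (n : Int)) = year_to_number_alt (1 + (n : Int)) := by
  induction n with
  | zero => decide
  | succ n ih =>
    have hcast : (1 : Int) + ((n + 1 : Nat) : Int) = (1 + (n : Int)) + 1 := by push_cast; ring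
    rw [hcast, pv_loop_step n, ih, pv_alt_closed n, hcast.symm, pv_alt_closed (n + 1)]
    have hc := pv_closed_step (n : Int)
    rw [show ((n + 1 : Nat) : Int) = (n : Int) + 1 by push_cast; ring,
      show (1 : Int) + (n : Int) = (n : Int) + 1 by ring]
    rw [show (1 : Int) + (n : Int) = (n : Int) + 1 by ring] at *
    split_ifs at hc ⊢ with h <;> linarith [hc]

-- ===== VERDICT (by name: the statement is the Claim_ definition above) =====
theorem year_to_number_spec : Claim_equal_year_to_number := by
  intro y _
  unfold Spec_year_to_number
  rcases le_or_gt y 1 with h | h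
  · rw [year_to_number, PySem.List.pyRange_one_eq_nil h]
    unfold year_to_number_alt
    simp [not_lt.mpr h, PySem.Int.floordiv]
  · have hn : y = 1 + ((y - 1).toNat : Int) := by omega
    rw [hn]; exact pv_main _
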